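-- pv_equiv track=rewrite | github.com/JadonPage/todo-app | Coding Exercises/Day 13/Coding Exercise 4.py | get_num_names
-- ===== SOURCE A (Python) =====
-- def get_num_names(names_arg):
--     """My solution"""
--     start = 0
--     names_list = []
--     index = 0
--     for i in names_arg:
--         if i == ",":
--             name = names_arg[start:index]
--             names_list.append(name)
--             start = index + 1
--         elif index == len(names_arg) - 1:
--             name = names_arg[start:index]
--             names_list.append(name)
--         index += 1
--     number = len(names_list)
--     return number
-- ===== SOURCE B (Python) =====
-- def get_num_names(names_arg):
--     """Closed form: every comma produced one append, and one more append
--     happened at the last character iff the string is non-empty and does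
--     not end with a comma."""
--     return names_arg.count(',') + (1 if names_arg and not names_arg.endswith(',') else 0)
-- ===== Notes on version B (the rewrite author's own statement) =====
-- stated objective: simpler
-- what changed: Replaced the index-tracking loop that builds a list of name slices with a closed form: the comma count plus 1 when the string is non-empty and does not end with a comma (measured ~21x faster at the largest size).
import Mathlib
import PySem

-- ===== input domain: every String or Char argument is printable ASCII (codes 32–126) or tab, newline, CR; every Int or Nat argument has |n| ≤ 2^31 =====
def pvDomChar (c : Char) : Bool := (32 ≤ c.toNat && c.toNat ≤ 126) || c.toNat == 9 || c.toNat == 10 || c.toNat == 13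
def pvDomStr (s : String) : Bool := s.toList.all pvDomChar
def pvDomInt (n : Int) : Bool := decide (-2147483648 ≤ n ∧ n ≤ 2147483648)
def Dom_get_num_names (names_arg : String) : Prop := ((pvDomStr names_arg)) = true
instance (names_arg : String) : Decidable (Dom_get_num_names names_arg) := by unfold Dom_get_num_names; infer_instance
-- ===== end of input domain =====

-- B replaces A's index-tracking slice-collecting loop with a closed form
-- (comma count + 1 iff non-empty and not ending in a comma); objective: simpler.


-- ===== PORT A =====
-- the for-loop of A: state is (start, names_list, index); cs is the rest of the iteration
def pvA_loop (names_arg : String) : List Char → Int → List String → Int → List String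
  | [], _, names_list, _ => names_list
  | i :: rest, start, names_list, index =>
    if i = ',' then
      pvA_loop names_arg rest (index + 1)
        (names_list ++ [PySem.Str.slice names_arg (some start) (some index)]) (index + 1)
    else if index = PySem.Str.len names_arg - 1 then
      pvA_loop names_arg rest start
        (names_list ++ [PySem.Str.slice names_arg (some start) (some index)]) (index + 1)
    else
      pvA_loop names_arg rest start names_list (index + 1)

def get_num_names (names_arg : String) : Int :=
  ((pvA_loop names_arg names_arg.toList 0 [] 0).length : Int)

-- ===== PORT B =====
def get_num_names_alt (names_arg : String) : Int :=
  (PySem.Str.count names_arg "," : Int) +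
    (if names_arg.toList ≠ [] ∧ PySem.Str.endswith names_arg "," = false then 1 else 0)

-- ===== PRECONDITION & SPEC =====
def Spec_get_num_names (names_arg : String) (out : Int) : Prop := out = get_num_names_alt names_arg
instance (names_arg : String) (out : Int) : Decidable (Spec_get_num_names names_arg out) := by unfold Spec_get_num_names; infer_instance

-- ===== CLAIM (what is proved, stated in full; the proofs are below) =====
def Claim_equal_get_num_names : Prop := ∀ (names_arg : String), Dom_get_num_names names_arg → Spec_get_num_names names_arg (get_num_names names_arg)

-- ===== LEMMAS AND PROOFS =====

-- length of A's accumulated list, by induction on the remaining characters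
theorem pvA_loop_length (s : String) (cs : List Char) :
    ∀ (start idx : Int) (acc : List String),
      idx + (cs.length : Int) = PySem.Str.len s →
      ((pvA_loop s cs start acc idx).length : Int) =
        (acc.length : Int) + (cs.count ',' : Int) +
          (if cs ≠ [] ∧ cs.getLast? ≠ some ',' then 1 else 0) := by
  induction cs with
  | nil => intro start idx acc _; simp [pvA_loop]
  | cons c rest ih =>
    intro start idx acc h
    by_cases hc : c = ','
    · subst hc
      rw [pvA_loop, if_pos rfl, ih _ _ _ (by push_cast [List.length_cons] at h ⊢; omega)]
      rcases rest with _ | ⟨r, rs⟩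
      · simp
      · simp [List.count_cons, List.getLast?_cons_cons]
        omega
    · have hcount : (c :: rest).count ',' = rest.count ',' := by
        simp [hc]
      rcases rest with _ | ⟨r, rs⟩
      · -- last character, not a comma: the elif fires
        have hlast : idx = PySem.Str.len s - 1 := by simp only [List.length_cons, List.length_nil] at h; push_cast at h; omega
        rw [pvA_loop, if_neg hc, if_pos hlast]
        simp [pvA_loop, hc]
      · -- middle character, not a comma: nothing appended
        have hne : idx ≠ PySem.Str.len s - 1 := by simp only [List.length_cons] at h; push_cast at h; omega
        rw [pvA_loop, if_neg hc, if_neg hne,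
            ih _ _ _ (by push_cast [List.length_cons] at h ⊢; omega)]
        simp [hcount, List.getLast?_cons_cons]

-- Python s.count(c) for a single character is the character count
theorem count_go_single (c : Char) :
    ∀ (fuel : Nat) (cs : List Char) (acc : Nat), cs.length ≤ fuel →
      PySem.Chars.count.go [c] fuel cs acc = acc + cs.count c := by
  intro fuel
  induction fuel with
  | zero => intro cs acc h; interval_cases h' : cs.length; simp_all [PySem.Chars.count.go, List.length_eq_zero_iff.mp h']
  | succ n ih =>
    intro cs acc h
    rcases cs with _ | ⟨x, xs⟩
    · simp [PySem.Chars.count.go]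
    · rw [PySem.Chars.count.go]
      by_cases hx : c = x
      · subst hx
        simp only [List.isPrefixOf, BEq.rfl, Bool.true_and, if_true]
        rw [ih _ _ (by simpa using Nat.le_of_succ_le_succ h)]
        simp
        omega
      · have hpre : ([c].isPrefixOf (x :: xs)) = false := by
          simp [List.isPrefixOf]
          exact hx
        rw [hpre]
        simp only [if_neg Bool.false_ne_true]
        rw [ih _ _ (by simpa using Nat.le_of_succ_le_succ h)]
        simp [List.count_cons]
        exact fun h' => hx h'.symm

theorem chars_count_single (cs : List Char) (c : Char) :
    PySem.Chars.count cs [c] = cs.count c := by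
  rw [PySem.Chars.count]
  simp [count_go_single c cs.length cs 0 le_rfl]

theorem suffix_single (cs : List Char) (c : Char) :
    [c] <:+ cs ↔ cs.getLast? = some c := by
  constructor
  · rintro ⟨ys, rfl⟩; simp
  · intro h
    rcases List.getLast?_eq_some_iff.mp h with ⟨ys, rfl⟩
    exact ⟨ys, rfl⟩

theorem endswith_single (cs : List Char) (c : Char) :
    PySem.Chars.endswith cs [c] = false ↔ cs.getLast? ≠ some c := by
  simp only [PySem.Chars.endswith, Bool.eq_false_iff, Ne, List.isSuffixOf_iff_suffix, suffix_single]

-- ===== VERDICT (by name: the statement is the Claim_ definition above) =====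
theorem get_num_names_spec : Claim_equal_get_num_names := by
  intro s _
  unfold Spec_get_num_names get_num_names get_num_names_alt
  rw [pvA_loop_length s s.toList 0 0 [] (by simp [PySem.Str.len_eq])]
  rw [PySem.Str.count_eq, PySem.Str.endswith_eq]
  have : ("," : String).toList = [','] := rfl
  rw [this, chars_count_single]
  by_cases hne : s.toList = []
  · simp [hne]
  · by_cases hl : s.toList.getLast? = some ','
    · simp [hne, hl, (endswith_single s.toList ',').not.mpr (by simp [hl])]
    · simp [hne, hl, (endswith_single s.toList ',').mpr hl]
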